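-- pv_equiv track=rewrite | github.com/foreverpiano/paulgraham-cn | src/scraper.py | find_notes_boundary
-- ===== SOURCE A (Python) =====
-- NOTES_HEADING_PATTERNS = [
--     "<b>Notes</b>", "<b>Notes:</b>", "<b>Note</b>", "<b>Note:</b>",
--     ">Notes<", ">Notes:<", ">Note<", ">Note:<",
-- ]
--
-- def find_notes_boundary(html: str) -> int:
--     """Find the index where the Notes/Note section begins in the HTML.
--     Returns -1 if no notes section found."""
--     best = -1
--     html_lower = html.lower()
--     for pattern in NOTES_HEADING_PATTERNS:
--         idx = html_lower.find(pattern.lower())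
--         if idx != -1 and (best == -1 or idx < best):
--             best = idx
--     return best
-- ===== SOURCE B (Python) =====
-- NOTES_HEADING_PATTERNS = [
--     "<b>Notes</b>", "<b>Notes:</b>", "<b>Note</b>", "<b>Note:</b>",
--     ">Notes<", ">Notes:<", ">Note<", ">Note:<",
-- ]
--
-- def find_notes_boundary(html: str) -> int:
--     """Single left-to-right scan: return the first position where any
--     (lower-cased) heading pattern starts; -1 if none occurs."""
--     hl = html.lower()
--     pats = [p.lower() for p in NOTES_HEADING_PATTERNS]
--     for i in range(len(hl)):
--         if any(hl.startswith(p, i) for p in pats):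
--             return i
--     return -1
-- ===== Notes on version B (the rewrite author's own statement) =====
-- stated objective: alternative
-- what changed: Replaces A's pattern-major strategy (eight full str.find scans with min-tracking) by a single position-major left-to-right scan of the lowered string that returns the first index where any lowered pattern starts.
import Mathlib
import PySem

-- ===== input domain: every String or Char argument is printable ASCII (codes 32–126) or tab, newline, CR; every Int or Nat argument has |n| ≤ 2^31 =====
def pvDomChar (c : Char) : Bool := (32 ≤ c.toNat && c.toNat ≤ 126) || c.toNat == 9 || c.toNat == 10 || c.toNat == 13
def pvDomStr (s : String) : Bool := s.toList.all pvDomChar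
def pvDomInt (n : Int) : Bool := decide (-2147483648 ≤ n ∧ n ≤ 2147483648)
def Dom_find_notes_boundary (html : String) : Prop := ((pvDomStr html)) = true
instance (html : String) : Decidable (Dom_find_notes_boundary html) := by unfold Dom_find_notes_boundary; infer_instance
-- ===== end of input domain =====

-- B replaces A's eight full find scans with min tracking by one left-to-right scan
-- returning the first position where any pattern starts (objective: alternative).

def NOTES_HEADING_PATTERNS : List String :=
  ["<b>Notes</b>", "<b>Notes:</b>", "<b>Note</b>", "<b>Note:</b>",
   ">Notes<", ">Notes:<", ">Note<", ">Note:<"]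

-- ===== PORT A =====
def find_notes_boundary (html : String) : Int :=
  let html_lower := PySem.Str.lower html
  NOTES_HEADING_PATTERNS.foldl (fun best pattern =>
    let idx := PySem.Str.find html_lower (PySem.Str.lower pattern)
    if idx ≠ -1 ∧ (best = -1 ∨ idx < best) then idx else best) (-1)

-- ===== PORT B =====
-- the scan: first index (counted from `i`) at which some pattern is a prefix of the suffix
def pvScan (pats : List (List Char)) (i : Nat) (s : List Char) : Int :=
  match s with
  | [] => -1
  | _ :: rest =>
      if pats.any (fun p => p.isPrefixOf s) then (i : Int)
      else pvScan pats (i + 1) rest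

def find_notes_boundary_alt (html : String) : Int :=
  let pats := NOTES_HEADING_PATTERNS.map (fun p => (PySem.Str.lower p).toList)
  pvScan pats 0 (PySem.Str.lower html).toList

-- ===== PRECONDITION & SPEC =====
def Spec_find_notes_boundary (html : String) (out : Int) : Prop := out = find_notes_boundary_alt html
instance (html : String) (out : Int) : Decidable (Spec_find_notes_boundary html out) := by unfold Spec_find_notes_boundary; infer_instance

-- ===== CLAIM (what is proved, stated in full; the proofs are below) =====
def Claim_equal_find_notes_boundary : Prop := ∀ (html : String), Dom_find_notes_boundary html → Spec_find_notes_boundary html (find_notes_boundary html)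

-- ===== LEMMAS AND PROOFS =====

-- "some pattern starts at position j of H"
def pvMatchAt (pats : List (List Char)) (H : List Char) (j : Nat) : Prop :=
  ∃ p ∈ pats, p <+: H.drop j

-- characterization of the B-side scan: it is -1 when nothing matches,
-- otherwise the least position of a match
theorem pvScan_spec (pats : List (List Char)) (H : List Char) :
    ∀ (s : List Char) (i : Nat), s = H.drop i →
    (pvScan pats i s = -1 ∧ ∀ j, i ≤ j → j < H.length → ¬ pvMatchAt pats H j) ∨
    (∃ n : Nat, pvScan pats i s = (n : Int) ∧ i ≤ n ∧ pvMatchAt pats H n ∧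
      ∀ j, i ≤ j → j < n → ¬ pvMatchAt pats H j) := by
  intro s
  induction s with
  | nil =>
      intro i hs
      left
      refine ⟨rfl, ?_⟩
      intro j hij hjl _
      have : H.length ≤ i := List.drop_eq_nil_iff.mp hs.symm
      omega
  | cons c rest ih =>
      intro i hs
      rw [pvScan]
      by_cases hany : pats.any (fun p => p.isPrefixOf (c :: rest)) = true
      · right
        refine ⟨i, by simp [hany], le_refl i, ?_, by omega⟩
        rcases List.any_eq_true.mp hany with ⟨p, hp, hpre⟩
        exact ⟨p, hp, by rw [← hs]; exact List.isPrefixOf_iff_prefix.mp hpre⟩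
      · have hrest : rest = H.drop (i + 1) := by
          have h1 : H.drop (i + 1) = (H.drop i).drop 1 := by
            rw [List.drop_drop]
          rw [h1, ← hs]
          rfl
        have hnomatch_i : ¬ pvMatchAt pats H i := by
          intro ⟨p, hp, hpre⟩
          apply hany
          exact List.any_eq_true.mpr ⟨p, hp, List.isPrefixOf_iff_prefix.mpr (by rw [hs]; exact hpre)⟩
        rcases ih (i + 1) hrest with ⟨h1, h2⟩ | ⟨n, h1, h2, h3, h4⟩
        · left
          refine ⟨by simp [hany, h1], ?_⟩
          intro j hij hjl
          rcases Nat.eq_or_lt_of_le hij with rfl | hlt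
          · exact hnomatch_i
          · exact h2 j hlt hjl
        · right
          refine ⟨n, by simp [hany, h1], by omega, h3, ?_⟩
          intro j hij hjn
          rcases Nat.eq_or_lt_of_le hij with rfl | hlt
          · exact hnomatch_i
          · exact h4 j hlt hjn

-- characterization of A's min-tracking fold over the list of find-values
theorem pvMinFold_char (vs : List Int) : ∀ (b : Int),
    (vs.foldl (fun best idx => if idx ≠ -1 ∧ (best = -1 ∨ idx < best) then idx else best) b = b ∨
       vs.foldl (fun best idx => if idx ≠ -1 ∧ (best = -1 ∨ idx < best) then idx else best) b ∈ vs) ∧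
    (vs.foldl (fun best idx => if idx ≠ -1 ∧ (best = -1 ∨ idx < best) then idx else best) b = -1 →
       b = -1 ∧ ∀ v ∈ vs, v = -1) ∧
    (vs.foldl (fun best idx => if idx ≠ -1 ∧ (best = -1 ∨ idx < best) then idx else best) b ≠ -1 →
       (b = -1 ∨ vs.foldl (fun best idx => if idx ≠ -1 ∧ (best = -1 ∨ idx < best) then idx else best) b ≤ b) ∧
       ∀ v ∈ vs, v = -1 ∨ vs.foldl (fun best idx => if idx ≠ -1 ∧ (best = -1 ∨ idx < best) then idx else best) b ≤ v) := by
  induction vs with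
  | nil =>
      intro b
      simp
  | cons v vs ih =>
      intro b
      simp only [List.foldl_cons]
      by_cases hc : v ≠ -1 ∧ (b = -1 ∨ v < b)
      · rw [if_pos hc]
        obtain ⟨hmem, hneg, hpos⟩ := ih v
        refine ⟨?_, ?_, ?_⟩
        · rcases hmem with h | h
          · exact Or.inr (by rw [h]; exact List.mem_cons_self)
          · exact Or.inr (List.mem_cons_of_mem _ h)
        · intro hr
          exact absurd (hneg hr).1 hc.1
        · intro hr
          obtain ⟨hle, hall⟩ := hpos hr
          have hrv : vs.foldl (fun best idx => if idx ≠ -1 ∧ (best = -1 ∨ idx < best) then idx else best) v ≤ v := by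
            rcases hle with h | h
            · exact absurd h hc.1
            · exact h
          constructor
          · rcases hc.2 with h | h
            · exact Or.inl h
            · right; omega
          · intro x hx
            rcases List.mem_cons.mp hx with rfl | hx
            · exact Or.inr hrv
            · exact hall x hx
      · rw [if_neg hc]
        obtain ⟨hmem, hneg, hpos⟩ := ih b
        refine ⟨?_, ?_, ?_⟩
        · rcases hmem with h | h
          · exact Or.inl h
          · exact Or.inr (List.mem_cons_of_mem _ h)
        · intro hr
          obtain ⟨hb, hall⟩ := hneg hr
          have hv : v = -1 := by
            by_contra hv
            exact hc ⟨hv, Or.inl hb⟩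
          refine ⟨hb, ?_⟩
          intro x hx
          rcases List.mem_cons.mp hx with rfl | hx
          · exact hv
          · exact hall x hx
        · intro hr
          obtain ⟨hle, hall⟩ := hpos hr
          refine ⟨hle, ?_⟩
          intro x hx
          rcases List.mem_cons.mp hx with rfl | hx
          · by_cases hv : x = -1
            · exact Or.inl hv
            · right
              have hnb : ¬ (b = -1 ∨ x < b) := fun h => hc ⟨hv, h⟩
              rw [not_or] at hnb
              obtain ⟨hnb1, hnb2⟩ := hnb
              rcases hle with h | h
              · omega
              · omega
          · exact hall x hx

theorem find_notes_boundary_eq_alt : ∀ (html : String),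
    find_notes_boundary html = find_notes_boundary_alt html := by
  intro html
  set H : List Char := (PySem.Str.lower html).toList with hH
  set pats : List (List Char) := NOTES_HEADING_PATTERNS.map (fun p => (PySem.Str.lower p).toList) with hpats
  have hne : ∀ p ∈ pats, p ≠ [] := by decide
  set vs : List Int := pats.map (fun p => PySem.Chars.find H p) with hvs
  -- A is the min-tracking fold over the list of find-values
  have hA : find_notes_boundary html =
      vs.foldl (fun best idx => if idx ≠ -1 ∧ (best = -1 ∨ idx < best) then idx else best) (-1) := by
    rw [find_notes_boundary, hvs, hpats]
    simp only [List.map_map, List.foldl_map, PySem.Str.find_eq, hH]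
    rfl
  have hB : find_notes_boundary_alt html = pvScan pats 0 H := rfl
  obtain ⟨hmem, hneg, hpos⟩ := pvMinFold_char vs (-1)
  rw [hA, hB]
  -- a helper: any find-value that is not -1 witnesses a match strictly inside H
  have hfind_match : ∀ p ∈ pats, PySem.Chars.find H p ≠ -1 →
      (PySem.Chars.find H p).toNat < H.length ∧ p <+: H.drop (PySem.Chars.find H p).toNat := by
    intro p hp hf
    have h0 : 0 ≤ PySem.Chars.find H p := by
      have := PySem.Chars.neg_one_le_find (s := H) (sub := p); omega
    obtain ⟨hpre, _⟩ := PySem.Chars.find_spec (s := H) (sub := p) h0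
    have hle := PySem.Chars.find_le_length (s := H) (sub := p)
    refine ⟨?_, hpre⟩
    rcases Nat.lt_or_ge (PySem.Chars.find H p).toNat H.length with h' | h'
    · exact h'
    · exfalso
      have hnil : H.drop (PySem.Chars.find H p).toNat = [] := List.drop_eq_nil_iff.mpr h'
      rw [hnil] at hpre
      exact hne p hp (List.prefix_nil.mp hpre)
  rcases pvScan_spec pats H H 0 (by simp) with ⟨h1, h2⟩ | ⟨n, h1, _, h3, h4⟩
  · -- no match anywhere: every find-value is -1, so the fold stays at -1
    rw [h1]
    have hall1 : ∀ v ∈ vs, v = -1 := by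
      intro v hv
      rcases List.mem_map.mp (hvs ▸ hv) with ⟨p, hp, rfl⟩
      by_contra hf
      obtain ⟨hlt, hpre⟩ := hfind_match p hp hf
      exact h2 _ (Nat.zero_le _) hlt ⟨p, hp, hpre⟩
    rcases hmem with h | h
    · exact h
    · exact hall1 _ h
  · -- first match at n: the fold equals n
    rw [h1]
    obtain ⟨p0, hp0, hpre0⟩ := h3
    have hin : PySem.Chars.isIn p0 H = true :=
      (PySem.Chars.exists_prefix_drop_iff_isIn (sub := p0) (s := H)).mp ⟨n, hpre0⟩
    have hf0 : PySem.Chars.find H p0 ≠ -1 :=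
      (PySem.Chars.find_ne_neg_one_iff (s := H) (sub := p0)).mpr ((PySem.Chars.isIn_iff_infix (sub := p0) (s := H)).mp hin)
    have hmem0 : PySem.Chars.find H p0 ∈ vs := by
      rw [hvs]; exact List.mem_map.mpr ⟨p0, hp0, rfl⟩
    set r := vs.foldl (fun best idx => if idx ≠ -1 ∧ (best = -1 ∨ idx < best) then idx else best) (-1) with hr
    have hrne : r ≠ -1 := by
      intro h
      obtain ⟨_, hall⟩ := hneg h
      exact hf0 (hall _ hmem0)
    obtain ⟨_, hall⟩ := hpos hrne
    -- find H p0 ≤ n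
    have h00 : 0 ≤ PySem.Chars.find H p0 := by
      have := PySem.Chars.neg_one_le_find (s := H) (sub := p0); omega
    obtain ⟨_, hmin0⟩ := PySem.Chars.find_spec (s := H) (sub := p0) h00
    have hfle : PySem.Chars.find H p0 ≤ (n : Int) := by
      by_contra hgt
      have hn_lt : n < (PySem.Chars.find H p0).toNat := by omega
      exact hmin0 n hn_lt hpre0
    have hrle : r ≤ (n : Int) := by
      rcases hall _ hmem0 with h | h
      · exact absurd h hf0
      · omega
    -- r is itself a find-value, hence a match position, hence ≥ n
    have hrmem : r ∈ vs := by
      rcases hmem with h | h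
      · exact absurd h hrne
      · exact h
    rcases List.mem_map.mp (hvs ▸ hrmem) with ⟨p1, hp1, hfind1⟩
    have hf1 : PySem.Chars.find H p1 ≠ -1 := by rw [hfind1]; exact hrne
    obtain ⟨_, hpre1⟩ := hfind_match p1 hp1 hf1
    have hr0 : 0 ≤ r := by
      rw [← hfind1]
      have := PySem.Chars.neg_one_le_find (s := H) (sub := p1)
      rw [← hfind1] at hrne
      omega
    have hge : n ≤ r.toNat := by
      by_contra hlt
      exact h4 r.toNat (Nat.zero_le _) (by omega) ⟨p1, hp1, by rw [← hfind1]; exact hpre1⟩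
    omega

-- ===== VERDICT (by name: the statement is the Claim_ definition above) =====
theorem find_notes_boundary_spec : Claim_equal_find_notes_boundary := by
  intro html _
  exact find_notes_boundary_eq_alt html
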